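-- pv_equiv track=rewrite | github.com/Wind-Maker1001/AIWF | apps/glue-python/app.py | _merge_detected_structures
-- ===== SOURCE A (Python) =====
-- from typing import Any, Dict, Optional
--
-- def _merge_detected_structures(file_results: list[dict[str, Any]]) -> str:
--     structures = {
--         str(item.get("detected_structure") or "").strip()
--         for item in file_results
--         if isinstance(item, dict) and str(item.get("detected_structure") or "").strip()
--     }
--     if not structures:
--         return "unknown"
--     if len(structures) == 1:
--         return next(iter(structures))
--     return "mixed"
-- ===== SOURCE B (Python) =====
-- def _merge_detected_structures(file_results: list) -> str:
--     vals = sorted(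
--         str(item.get("detected_structure") or "").strip()
--         for item in file_results
--         if isinstance(item, dict) and str(item.get("detected_structure") or "").strip()
--     )
--     if not vals:
--         return "unknown"
--     return vals[0] if vals[0] == vals[-1] else "mixed"
-- ===== Notes on version B (the rewrite author's own statement) =====
-- stated objective: alternative
-- what changed: Instead of materializing a set of distinct values and inspecting its cardinality, B collects the normalized non-empty values into a list, sorts it, and decides by comparing the smallest and largest elements (vals[0] == vals[-1] iff all values agree).
import Mathlib
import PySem

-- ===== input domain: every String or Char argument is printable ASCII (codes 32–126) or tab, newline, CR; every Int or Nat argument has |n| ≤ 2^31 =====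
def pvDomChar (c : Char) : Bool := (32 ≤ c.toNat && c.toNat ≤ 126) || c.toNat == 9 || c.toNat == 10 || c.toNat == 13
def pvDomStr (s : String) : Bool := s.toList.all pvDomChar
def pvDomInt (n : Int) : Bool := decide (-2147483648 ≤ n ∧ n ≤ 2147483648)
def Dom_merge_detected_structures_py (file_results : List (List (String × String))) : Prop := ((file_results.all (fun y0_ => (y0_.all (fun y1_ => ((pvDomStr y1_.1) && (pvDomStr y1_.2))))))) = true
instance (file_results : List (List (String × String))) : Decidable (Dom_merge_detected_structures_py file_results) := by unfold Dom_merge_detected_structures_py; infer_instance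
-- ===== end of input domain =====

-- B replaces A's distinct-value set + cardinality check by sort-then-compare-extremes; objective: alternative.

-- ===== PORT A =====
-- str(item.get("detected_structure") or "").strip(): values are strings, so `or ""` turns only a missing
-- key (None) into "" and str(·) is the identity; exact as getD with default "" then strip.
def pvNorm (item : List (String × String)) : String :=
  PySem.Str.strip ((PySem.Dict.mk item).getD "detected_structure" "")

-- set comprehension: fold Set.add over the items whose normalized value is non-empty
def merge_detected_structures_py (file_results : List (List (String × String))) : String :=
  let structures : PySem.Set String :=
    file_results.foldl (fun s item => if pvNorm item ≠ "" then PySem.Set.add s (pvNorm item) else s)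
      PySem.Set.empty
  if structures.length = 0 then "unknown"
  else if structures.length = 1 then structures.headD ""   -- next(iter(s)) on a singleton set
  else "mixed"

-- ===== PORT B =====
-- sorted(<generator of normalized non-empty values>); the guard nonemptiness discharges vals[0]/vals[-1]
def merge_detected_structures_py_alt (file_results : List (List (String × String))) : String :=
  let vals : List String :=
    PySem.List.sorted ((file_results.filter (fun item => pvNorm item ≠ "")).map pvNorm)
      (fun x => x) false
  if vals.length = 0 then "unknown"
  else if vals.headD "" = vals.getLastD "" then vals.headD "" else "mixed"

-- ===== PRECONDITION & SPEC =====
def Spec_merge_detected_structures_py (file_results : List (List (String × String))) (out : String) : Prop := out = merge_detected_structures_py_alt file_results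
instance (file_results : List (List (String × String))) (out : String) : Decidable (Spec_merge_detected_structures_py file_results out) := by unfold Spec_merge_detected_structures_py; infer_instance

-- ===== CLAIM (what is proved, stated in full; the proofs are below) =====
def Claim_equal_merge_detected_structures_py : Prop := ∀ (file_results : List (List (String × String))), Dom_merge_detected_structures_py file_results → Spec_merge_detected_structures_py file_results (merge_detected_structures_py file_results)

-- ===== LEMMAS AND PROOFS =====

-- A's fold over the raw items is Set.ofList of B's filtered+mapped value list
theorem pvFold_eq_ofList (fr : List (List (String × String))) :
    fr.foldl (fun s item => if pvNorm item ≠ "" then PySem.Set.add s (pvNorm item) else s)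
        PySem.Set.empty
      = PySem.Set.ofList ((fr.filter (fun item => pvNorm item ≠ "")).map pvNorm) := by
  rw [PySem.Set.ofList_eq_foldl]
  show _ = List.foldl _ PySem.Set.empty _
  generalize PySem.Set.empty = s
  induction fr generalizing s with
  | nil => rfl
  | cons item rest ih =>
    by_cases h : pvNorm item = ""
    · have hstep : (if pvNorm item ≠ "" then PySem.Set.add s (pvNorm item) else s) = s :=
        if_neg (by simp [h])
      rw [List.foldl_cons, hstep, List.filter_cons_of_neg (by simp [h])]
      exact ih s
    · have hstep : (if pvNorm item ≠ "" then PySem.Set.add s (pvNorm item) else s)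
          = PySem.Set.add s (pvNorm item) := if_pos h
      rw [List.foldl_cons, hstep, List.filter_cons_of_pos (by simp [h]), List.map_cons,
        List.foldl_cons]
      exact ih _

-- if every element of L equals a, folding Set.add from [a] stays [a]
theorem pvFold_const (L : List String) (a : String) (h : ∀ x ∈ L, x = a) :
    L.foldl PySem.Set.add [a] = [a] := by
  induction L with
  | nil => rfl
  | cons x t ih =>
    have hx : x = a := h x (by simp)
    have hstep : PySem.Set.add [a] x = [a] := by
      simp [PySem.Set.add, PySem.Set.contains, hx]
    simp only [List.foldl_cons, hstep]
    exact ih (fun y hy => h y (by simp [hy]))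

-- in the sorted list, if head equals last then every element equals the head
theorem pvSorted_all_eq (L : List String)
    (he : (PySem.List.sorted L (fun x => x) false).headD ""
        = (PySem.List.sorted L (fun x => x) false).getLastD "") :
    ∀ y ∈ PySem.List.sorted L (fun x => x) false,
      y = (PySem.List.sorted L (fun x => x) false).headD "" := by
  intro y hy
  obtain ⟨p, hp, rfl⟩ := List.mem_iff_getElem.mp hy
  have hne : PySem.List.sorted L (fun x => x) false ≠ [] :=
    List.ne_nil_of_length_pos (by omega)
  have hhead : (PySem.List.sorted L (fun x => x) false).headD ""
      = (PySem.List.sorted L (fun x => x) false)[0]'(by omega) := by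
    rw [List.headD_eq_head?, List.head?_eq_getElem?, List.getElem?_eq_getElem (by omega)]
    rfl
  have hlast : (PySem.List.sorted L (fun x => x) false).getLastD ""
      = (PySem.List.sorted L (fun x => x) false)[(PySem.List.sorted L (fun x => x) false).length - 1]'(by omega) := by
    rw [List.getLastD_eq_getLast?, List.getLast?_eq_getElem?, List.getElem?_eq_getElem (by omega)]
    rfl
  have h1 := PySem.List.sorted_id_getElem_mono (xs := L) (p := 0) (q := p)
    (by omega) hp
  have h2 := PySem.List.sorted_id_getElem_mono (xs := L) (p := p)
    (q := (PySem.List.sorted L (fun x => x) false).length - 1) (by omega) (by omega)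
  rw [hhead]
  rw [hhead, hlast] at he
  exact le_antisymm (he ▸ h2) h1

-- the two readouts agree for any value list L
theorem pvRead_eq (L : List String) :
    (if (PySem.Set.ofList L).length = 0 then "unknown"
     else if (PySem.Set.ofList L).length = 1 then (PySem.Set.ofList L).headD "" else "mixed")
    = (if (PySem.List.sorted L (fun x => x) false).length = 0 then "unknown"
       else if (PySem.List.sorted L (fun x => x) false).headD ""
              = (PySem.List.sorted L (fun x => x) false).getLastD ""
            then (PySem.List.sorted L (fun x => x) false).headD "" else "mixed") := by
  cases hLc : L with
  | nil => simp [PySem.Set.ofList]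
  | cons a t =>
    have hvne : PySem.List.sorted (a :: t) (fun x => x) false ≠ [] := by
      rw [Ne, PySem.List.sorted_eq_nil_iff]; simp
    have hvlen : (PySem.List.sorted (a :: t) (fun x => x) false).length ≠ 0 := by
      simpa using hvne
    have hSne : (PySem.Set.ofList (a :: t)).length ≠ 0 := by
      intro h
      have h0 : PySem.Set.ofList (a :: t) = [] := List.eq_nil_of_length_eq_zero h
      have ha : a ∈ PySem.Set.ofList (a :: t) := (PySem.Set.mem_ofList _ _).mpr (by simp)
      rw [h0] at ha; simp at ha
    rw [if_neg hSne, if_neg hvlen]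
    by_cases hall : ∀ x ∈ t, x = a
    · -- all values equal a: the set is the singleton [a]; sorted head = last = a
      have hset : PySem.Set.ofList (a :: t) = [a] := by
        rw [PySem.Set.ofList_eq_foldl]
        have hstep : PySem.Set.add PySem.Set.empty a = [a] := by
          simp [PySem.Set.add, PySem.Set.contains, PySem.Set.empty]
        simpa [hstep] using pvFold_const t a hall
      have hallvs : ∀ x ∈ PySem.List.sorted (a :: t) (fun x => x) false, x = a := by
        intro x hx
        rcases List.mem_cons.mp ((PySem.List.mem_sorted _ _ _ _).mp hx) with h | h
        · exact h
        · exact hall x h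
      have hhd : (PySem.List.sorted (a :: t) (fun x => x) false).headD "" = a := by
        apply hallvs
        rw [List.headD_eq_head?, List.head?_eq_getElem?, List.getElem?_eq_getElem (by omega)]
        exact List.getElem_mem _
      have hlst : (PySem.List.sorted (a :: t) (fun x => x) false).getLastD "" = a := by
        apply hallvs
        rw [List.getLastD_eq_getLast?, List.getLast?_eq_getElem?,
          List.getElem?_eq_getElem (by omega)]
        exact List.getElem_mem _
      rw [hset, hhd, hlst, if_pos rfl]
      rfl
    · -- two distinct values exist: the set has ≥ 2 elements; sorted head ≠ last
      push Not at hall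
      obtain ⟨x, hxt, hxa⟩ := hall
      have hmem_a : a ∈ PySem.Set.ofList (a :: t) := (PySem.Set.mem_ofList _ _).mpr (by simp)
      have hmem_x : x ∈ PySem.Set.ofList (a :: t) := (PySem.Set.mem_ofList _ _).mpr (by simp [hxt])
      have hlen2 : (PySem.Set.ofList (a :: t)).length ≠ 1 := by
        intro h1
        obtain ⟨y, hy⟩ := List.length_eq_one_iff.mp h1
        rw [hy] at hmem_a hmem_x
        simp at hmem_a hmem_x
        exact hxa (hmem_x.trans hmem_a.symm)
      rw [if_neg hlen2]
      have hne_hl : ¬ ((PySem.List.sorted (a :: t) (fun x => x) false).headD ""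
          = (PySem.List.sorted (a :: t) (fun x => x) false).getLastD "") := by
        intro he
        have hall' := pvSorted_all_eq (a :: t) he
        have ha' := hall' a ((PySem.List.mem_sorted _ _ _ _).mpr (by simp))
        have hx' := hall' x ((PySem.List.mem_sorted _ _ _ _).mpr (by simp [hxt]))
        exact hxa (hx'.trans ha'.symm)
      rw [if_neg hne_hl]

-- ===== VERDICT (by name: the statement is the Claim_ definition above) =====
theorem merge_detected_structures_py_spec : Claim_equal_merge_detected_structures_py := by
  intro fr _
  show _ = _
  unfold merge_detected_structures_py merge_detected_structures_py_alt
  simp only [pvFold_eq_ofList]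
  exact pvRead_eq _
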